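-- pv_equiv track=rewrite | github.com/3LENDERMAN/Python_projects | 03/exponent.py | largest_exponent
-- ===== SOURCE A (Python) =====
-- def largest_exponent(numbers, prime):
--     in_list = numbers[0]
--     largest = 0
--     index = 0
--     for number in numbers:
--         exponent = 0
--         prime_num = 2
--         while number > 1:
--             if is_prime(prime_num) and number % prime_num == 0:
--                 number //= prime_num
--                 if prime_num == prime:
--                     exponent += 1
--             else:
--                 prime_num += 1
--         if exponent >= largest:
--             if exponent == largest:
--                 in_list = min(numbers[index], in_list)
--             else:
--                 in_list = numbers[index]
--             largest = exponent
--         index += 1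
--     return in_list
--
-- def is_prime(num):
--     if num < 2:
--         return False
--     for i in range(2, num):
--         if num % i == 0 and num != i:
--             return False
--     return True
-- ===== SOURCE B (Python) =====
-- def is_prime(num):
--     if num < 2:
--         return False
--     i = 2
--     while i * i <= num:
--         if num % i == 0:
--             return False
--         i += 1
--     return True
--
-- def exponent_of(n, prime):
--     if n <= 1 or not is_prime(prime):
--         return 0
--     e = 0
--     while n % prime == 0:
--         n //= prime
--         e += 1
--     return e
--
-- def largest_exponent(numbers, prime):
--     exps = [exponent_of(n, prime) for n in numbers]
--     best = max(exps)
--     return min(n for n, e in zip(numbers, exps) if e == best)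
-- ===== Notes on version B (the rewrite author's own statement) =====
-- stated objective: faster
-- what changed: A's single fused pass, which fully factorizes every element by unit-increment trial division with an O(p) primality test at each candidate divisor, is replaced by a build-table-then-reduce decomposition: a per-element helper that divides out only the given prime (sqrt-bounded primality gate), then max over the exponent table and min over the argmax set.
import Mathlib
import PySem

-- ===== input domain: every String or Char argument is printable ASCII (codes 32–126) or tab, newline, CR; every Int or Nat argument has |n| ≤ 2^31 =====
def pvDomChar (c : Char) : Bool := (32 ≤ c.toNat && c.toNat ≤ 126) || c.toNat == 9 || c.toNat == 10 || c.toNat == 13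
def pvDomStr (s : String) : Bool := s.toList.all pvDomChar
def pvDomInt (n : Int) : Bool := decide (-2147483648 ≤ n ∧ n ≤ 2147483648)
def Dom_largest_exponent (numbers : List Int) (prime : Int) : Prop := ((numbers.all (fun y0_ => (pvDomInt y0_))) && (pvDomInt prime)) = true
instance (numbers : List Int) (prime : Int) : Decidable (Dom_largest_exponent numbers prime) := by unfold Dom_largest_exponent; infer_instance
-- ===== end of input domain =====

-- B replaces A's fused single pass (full trial-division factorization of every element inside the scan) by a
-- build-table-then-reduce decomposition: a per-element divide-out-the-prime helper with a sqrt-bounded primality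
-- gate, then max over the exponent table and min over the argmax set (objective: faster; measured).


-- ===== PORT A =====
-- is_prime(num): the early-return for loop is ported as .all over the same range
def isPrimeA (num : Int) : Bool :=
  if num < 2 then false
  else (PySem.List.pyRange 2 num).all (fun i => !(PySem.Int.mod num i == 0 && num != i))

-- the inner 'while number > 1' factorization loop of A; fuel is only a totality guard
-- (aExpGo_eq below proves 3 * number.toNat steps always suffice)
def aExpGo : Nat → Int → Int → Int → Int → Int
  | 0, _, _, exponent, _ => exponent
  | fuel + 1, number, prime_num, exponent, prime =>
    if number > 1 then
      if isPrimeA prime_num && PySem.Int.mod number prime_num == 0 then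
        aExpGo fuel (PySem.Int.floordiv number prime_num) prime_num
          (if prime_num == prime then exponent + 1 else exponent) prime
      else aExpGo fuel number (prime_num + 1) exponent prime
    else exponent

def aExp (number prime : Int) : Int := aExpGo (3 * number.toNat) number 2 0 prime

-- one iteration of A's for loop; state = (in_list, largest, index)
def aStep (numbers : List Int) (prime : Int) (st : Int × Int × Int) (number : Int) : Int × Int × Int :=
  let exponent := aExp number prime
  if exponent ≥ st.2.1 then
    (if exponent = st.2.1 then min (PySem.List.pyGetD numbers st.2.2 0) st.1
     else PySem.List.pyGetD numbers st.2.2 0, exponent, st.2.2 + 1)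
  else (st.1, st.2.1, st.2.2 + 1)

def largest_exponent (numbers : List Int) (prime : Int) : Int :=
  match PySem.List.pyGet? numbers 0 with
  | none => 0  -- numbers[0] raises IndexError on the empty list; excluded by Pre_
  | some in0 => (numbers.foldl (aStep numbers prime) (in0, 0, 0)).1

-- ===== PORT B =====
-- B's is_prime: the 'while i * i <= num' trial-division loop; fuel num.toNat is only a
-- totality guard (bIsPrimeGo_eq below proves it always suffices)
def bIsPrimeGo : Nat → Int → Int → Bool
  | 0, _, _ => true
  | fuel + 1, num, i =>
    if i * i ≤ num then
      if PySem.Int.mod num i == 0 then false else bIsPrimeGo fuel num (i + 1)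
    else true

def isPrimeB (num : Int) : Bool :=
  if num < 2 then false else bIsPrimeGo num.toNat num 2

-- the 'while n % prime == 0' loop of exponent_of; fuel n.toNat is only a totality guard
def bExpGo : Nat → Int → Int → Int → Int
  | 0, _, _, e => e
  | fuel + 1, n, prime, e =>
    if PySem.Int.mod n prime == 0 then bExpGo fuel (PySem.Int.floordiv n prime) prime (e + 1)
    else e

def exponent_of (n prime : Int) : Int :=
  if n ≤ 1 || !isPrimeB prime then 0 else bExpGo n.toNat n prime 0

def largest_exponent_alt (numbers : List Int) (prime : Int) : Int :=
  let exps := numbers.map (fun n => exponent_of n prime)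
  match PySem.List.max? exps (fun e => e) with
  | none => 0  -- max([]) raises ValueError on the empty list; excluded by Pre_
  | some best =>
    match PySem.List.min? (((numbers.zip exps).filter (fun p => p.2 == best)).map Prod.fst)
        (fun n => n) with
    | none => 0  -- unreachable: the argmax set is nonempty
    | some m => m

-- ===== PRECONDITION & SPEC =====
-- Pre_ excludes only the empty list, on which A raises IndexError (numbers[0]).
def Pre_largest_exponent (numbers : List Int) (prime : Int) : Prop := numbers ≠ []
instance (numbers : List Int) (prime : Int) : Decidable (Pre_largest_exponent numbers prime) := by
  unfold Pre_largest_exponent; infer_instance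
def pvWitness_largest_exponent : List Int × Int := ([12, 18, 5], 2)

def Spec_largest_exponent (numbers : List Int) (prime : Int) (out : Int) : Prop := out = largest_exponent_alt numbers prime
instance (numbers : List Int) (prime : Int) (out : Int) : Decidable (Spec_largest_exponent numbers prime out) := by unfold Spec_largest_exponent; infer_instance

-- ===== CLAIM (what is proved, stated in full; the proofs are below) =====
def Claim_equal_largest_exponent : Prop := ∀ (numbers : List Int) (prime : Int), Dom_largest_exponent numbers prime → Pre_largest_exponent numbers prime → Spec_largest_exponent numbers prime (largest_exponent numbers prime)

-- ===== LEMMAS AND PROOFS =====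

-- A's trial-division primality test recognizes exactly the primes (as a predicate on Int)
theorem isPrimeA_iff (p : Int) : isPrimeA p = true ↔ Nat.Prime p.toNat ∧ 2 ≤ p := by
  unfold isPrimeA
  split
  · rename_i hlt
    simp only [Bool.false_eq_true, false_iff, not_and]
    intro _ h2; omega
  · rename_i hlt
    have h2 : 2 ≤ p := by omega
    rw [List.all_eq_true]
    have key : (∀ i ∈ PySem.List.pyRange 2 p, (!(PySem.Int.mod p i == 0 && p != i)) = true) ↔
        (∀ i : Int, 2 ≤ i → i < p → ¬ i ∣ p) := by
      constructor
      · intro hall i hi2 hip hdvd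
        have := hall i (by rw [PySem.List.mem_pyRange_one]; exact ⟨hi2, hip⟩)
        simp only [Bool.not_eq_eq_eq_not, Bool.not_true, Bool.and_eq_false_imp, beq_iff_eq,
          bne_eq_false_iff_eq] at this
        have hm : PySem.Int.mod p i = 0 := (PySem.Int.mod_eq_zero_iff_dvd p i).mpr hdvd
        have := this hm
        omega
      · intro hfor i hi
        rw [PySem.List.mem_pyRange_one] at hi
        simp only [Bool.not_eq_eq_eq_not, Bool.not_true, Bool.and_eq_false_imp, beq_iff_eq,
          bne_eq_false_iff_eq]
        intro hm
        exact absurd ((PySem.Int.mod_eq_zero_iff_dvd p i).mp hm) (hfor i hi.1 hi.2)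
    rw [key]
    constructor
    · intro hfor
      refine ⟨?_, h2⟩
      rw [Nat.prime_def_lt]
      refine ⟨by omega, ?_⟩
      intro m hm hdvd
      by_contra hm1
      have hm0 : m ≠ 0 := by
        rintro rfl
        have := Nat.eq_zero_of_zero_dvd hdvd
        omega
      have hdint : (m : Int) ∣ p := by
        have : (m : Int) ∣ (p.toNat : Int) := Int.natCast_dvd_natCast.mpr hdvd
        rwa [Int.toNat_of_nonneg (by omega)] at this
      exact hfor (m : Int) (by omega) (by omega) hdint
    · rintro ⟨hp, -⟩ i hi2 hip hdvd
      rw [Nat.prime_def_lt] at hp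
      have hdnat : i.toNat ∣ p.toNat := by
        have : (i.toNat : Int) ∣ (p.toNat : Int) := by
          rwa [Int.toNat_of_nonneg (by omega : (0:Int) ≤ i), Int.toNat_of_nonneg (by omega : (0:Int) ≤ p)]
        exact_mod_cast this
      have := hp.2 i.toNat (by omega) hdnat
      omega

theorem toNat_ediv_eq (a b : Int) (ha : 0 ≤ a) (hb : 0 ≤ b) :
    (a / b).toNat = a.toNat / b.toNat := by
  obtain ⟨m, rfl⟩ := Int.eq_ofNat_of_zero_le ha
  obtain ⟨k, rfl⟩ := Int.eq_ofNat_of_zero_le hb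
  rw [Int.ofNat_ediv_ofNat, Int.toNat_natCast, Int.toNat_natCast, Int.toNat_natCast]

-- multiplicity drops by one after dividing by the prime p
theorem factorization_self_div (m p : Nat) (hp : Nat.Prime p) (hm : m ≠ 0) (hd : p ∣ m) :
    ((m / p).factorization p : Int) = (m.factorization p : Int) - 1 := by
  have h1 := Nat.factorization_div hd
  have h2 : (m / p).factorization p = m.factorization p - p.factorization p := by
    rw [h1, Finsupp.tsub_apply]
  rw [h2, hp.factorization_self]
  have := hp.factorization_pos_of_dvd hm hd
  omega

-- dividing by a different prime q leaves the multiplicity of p unchanged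
theorem factorization_div_ne (m p q : Nat) (hq : Nat.Prime q) (hd : q ∣ m) (hne : q ≠ p) :
    (m / q).factorization p = m.factorization p := by
  have h2 : (m / q).factorization p = m.factorization p - q.factorization p := by
    rw [Nat.factorization_div hd, Finsupp.tsub_apply]
  rw [h2, hq.factorization, Finsupp.single_apply]
  simp [hne]

-- invariant for A's inner loop: no prime below prime_num still divides number
def AInv (n pn : Int) : Prop := ∀ q : Int, 2 ≤ q → q < pn → isPrimeA q → ¬ (q ∣ n)

-- A's inner loop computes the multiplicity of `prime` in `number` (once prime_num reaches it)
-- while the invariant holds and number > 1, prime_num cannot exceed number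
theorem AInv_le (n pn : Int) (hinv : AInv n pn) (hn : 1 < n) : pn ≤ n := by
  by_contra hcon
  rw [not_le] at hcon
  have hm : 2 ≤ n.toNat := by omega
  have hq := Nat.minFac_prime (show n.toNat ≠ 1 by omega)
  have hq2 : 2 ≤ n.toNat.minFac := hq.two_le
  have hqle : n.toNat.minFac ≤ n.toNat := Nat.minFac_le (by omega)
  have hqd : (n.toNat.minFac : Int) ∣ n := by
    have : (n.toNat.minFac : Int) ∣ (n.toNat : Int) := Int.natCast_dvd_natCast.mpr (Nat.minFac_dvd _)
    rwa [Int.toNat_of_nonneg (by omega : (0:Int) ≤ n)] at this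
  have hprim : isPrimeA (n.toNat.minFac : Int) = true :=
    (isPrimeA_iff _).mpr ⟨by simpa using hq, by exact_mod_cast hq2⟩
  exact hinv (n.toNat.minFac : Int) (by exact_mod_cast hq2) (by omega) hprim hqd

theorem factorization_le_one_eq_zero (m p : Nat) (hm : m ≤ 1) : m.factorization p = 0 := by
  interval_cases m <;> simp

theorem aExpGo_eq (fuel : Nat) : ∀ (n pn exp prime : Int), 2 ≤ pn → AInv n pn →
    2 * n.toNat + (n.toNat + 2 - pn.toNat) ≤ fuel →
    aExpGo fuel n pn exp prime =
      exp + (if isPrimeA prime = true ∧ pn ≤ prime then (n.toNat.factorization prime.toNat : Int) else 0) := by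
  induction fuel with
  | zero =>
    intro n pn exp prime h2 hinv hf
    have hn0 : n.toNat = 0 := by omega
    simp [aExpGo, hn0]
  | succ f ih =>
    intro n pn exp prime h2 hinv hf
    by_cases hn : 1 < n
    swap
    · -- number ≤ 1: loop exits, and the multiplicity in n is 0
      simp only [aExpGo, if_neg (by omega : ¬ n > 1)]
      rw [factorization_le_one_eq_zero n.toNat prime.toNat (by omega)]
      simp
    by_cases hc : isPrimeA pn = true ∧ PySem.Int.mod n pn = 0
    · -- divide branch
      obtain ⟨hppn, hmod⟩ := hc
      obtain ⟨hpnat, -⟩ := (isPrimeA_iff pn).mp hppn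
      have hdvd : pn ∣ n := (PySem.Int.mod_eq_zero_iff_dvd n pn).mp hmod
      have hfd : PySem.Int.floordiv n pn = n / pn := PySem.Int.floordiv_eq_ediv_of_pos (by omega)
      have hk : pn * (n / pn) = n := Int.mul_ediv_cancel' hdvd
      have hk1 : 1 ≤ n / pn := by
        nlinarith [Int.ediv_nonneg (by omega : (0:Int) ≤ n) (by omega : (0:Int) ≤ pn)]
      have htn : (n / pn).toNat = n.toNat / pn.toNat := toNat_ediv_eq n pn (by omega) (by omega)
      have hlt : n.toNat / pn.toNat < n.toNat := Nat.div_lt_self (by omega) (by omega)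
      have hdnat : pn.toNat ∣ n.toNat := by
        have : (pn.toNat : Int) ∣ (n.toNat : Int) := by
          rwa [Int.toNat_of_nonneg (by omega : (0:Int) ≤ pn),
            Int.toNat_of_nonneg (by omega : (0:Int) ≤ n)]
        exact_mod_cast this
      have hinv' : AInv (n / pn) pn := by
        intro q hq2 hqpn hqp hqd
        exact hinv q hq2 hqpn hqp (hqd.trans ⟨pn, by linarith [hk]⟩)
      simp only [aExpGo, if_pos hn, hppn, hmod, beq_self_eq_true, Bool.and_self, if_true, hfd]
      rw [ih (n / pn) pn (if (pn == prime) = true then exp + 1 else exp) prime h2 hinv' (by omega)]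
      by_cases hpe : pn = prime
      · subst hpe
        have hcond : isPrimeA pn = true ∧ pn ≤ pn := ⟨hppn, le_refl _⟩
        rw [if_pos hcond, if_pos hcond, if_pos (by simp)]
        rw [htn, factorization_self_div n.toNat pn.toNat hpnat (by omega) hdnat]
        ring
      · rw [if_neg (by simp [hpe])]
        by_cases hcond : isPrimeA prime = true ∧ pn ≤ prime
        · rw [if_pos hcond, if_pos hcond, htn,
            factorization_div_ne n.toNat prime.toNat pn.toNat hpnat hdnat (by omega)]
        · rw [if_neg hcond, if_neg hcond]
    · -- increment branch
      have hple : pn ≤ n := AInv_le n pn hinv hn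
      have hinv' : AInv n (pn + 1) := by
        intro q hq2 hqpn hqp hqd
        by_cases hq : q = pn
        · subst hq
          exact hc ⟨hqp, (PySem.Int.mod_eq_zero_iff_dvd n q).mpr hqd⟩
        · exact hinv q hq2 (by omega) hqp hqd
      have hcb : (isPrimeA pn && PySem.Int.mod n pn == 0) = false := by
        by_cases h : isPrimeA pn = true
        · have hnm : ¬ PySem.Int.mod n pn = 0 := fun hm => hc ⟨h, hm⟩
          simp [h, hnm]
        · simp [Bool.eq_false_iff.mpr h]
      simp only [aExpGo, if_pos hn, hcb, Bool.false_eq_true, if_false]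
      rw [ih n (pn + 1) exp prime (by omega) hinv' (by omega)]
      by_cases hpe : pn = prime
      · -- pn = prime and pn does not divide n (or pn is not prime): multiplicity is 0 either way
        subst hpe
        by_cases h : isPrimeA pn = true
        swap
        · rw [if_neg (by simp [h]), if_neg (by simp [h])]
        · have hnd : ¬ pn ∣ n := fun hd => hc ⟨h, (PySem.Int.mod_eq_zero_iff_dvd n pn).mpr hd⟩
          have hndnat : ¬ pn.toNat ∣ n.toNat := by
            intro hd
            apply hnd
            have : (pn.toNat : Int) ∣ (n.toNat : Int) := Int.natCast_dvd_natCast.mpr hd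
            rwa [Int.toNat_of_nonneg (by omega : (0:Int) ≤ pn),
              Int.toNat_of_nonneg (by omega : (0:Int) ≤ n)] at this
          rw [if_neg (by omega : ¬ (isPrimeA pn = true ∧ pn + 1 ≤ pn)), if_pos ⟨h, le_refl _⟩,
            Nat.factorization_eq_zero_of_not_dvd hndnat]
          simp
      · by_cases hcond : isPrimeA prime = true ∧ pn + 1 ≤ prime
        · rw [if_pos hcond, if_pos ⟨hcond.1, by omega⟩]
        · rw [if_neg hcond, if_neg (by rintro ⟨ha, hb⟩; exact hcond ⟨ha, by omega⟩)]

-- B's division loop computes the multiplicity of `p` in `n`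
theorem bExpGo_eq (fuel : Nat) : ∀ (n p e : Int), Nat.Prime p.toNat → 2 ≤ p → 1 ≤ n →
    n.toNat ≤ fuel → bExpGo fuel n p e = e + (n.toNat.factorization p.toNat : Int) := by
  induction fuel with
  | zero => intro n p e _ _ h1 hf; omega
  | succ f ih =>
    intro n p e hp h2 h1 hf
    by_cases hd : PySem.Int.mod n p = 0
    · have hdvd : p ∣ n := (PySem.Int.mod_eq_zero_iff_dvd n p).mp hd
      have hfd : PySem.Int.floordiv n p = n / p := PySem.Int.floordiv_eq_ediv_of_pos (by omega)
      have hk : p * (n / p) = n := Int.mul_ediv_cancel' hdvd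
      have hk1 : 1 ≤ n / p := by nlinarith [Int.ediv_nonneg (by omega : (0:Int) ≤ n) (by omega : (0:Int) ≤ p)]
      have htn : (n / p).toNat = n.toNat / p.toNat := toNat_ediv_eq n p (by omega) (by omega)
      have hlt : n.toNat / p.toNat < n.toNat := Nat.div_lt_self (by omega) (by omega)
      have hdnat : p.toNat ∣ n.toNat := by
        have : (p.toNat : Int) ∣ (n.toNat : Int) := by
          rwa [Int.toNat_of_nonneg (by omega : (0:Int) ≤ p), Int.toNat_of_nonneg (by omega : (0:Int) ≤ n)]
        exact_mod_cast this
      simp only [bExpGo, hd, beq_self_eq_true, if_true, hfd]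
      rw [ih (n / p) p (e + 1) hp h2 hk1 (by omega)]
      rw [htn, factorization_self_div n.toNat p.toNat hp (by omega) hdnat]
      ring
    · have hnd : ¬ p.toNat ∣ n.toNat := by
        intro h
        have : (p.toNat : Int) ∣ (n.toNat : Int) := Int.natCast_dvd_natCast.mpr h
        rw [Int.toNat_of_nonneg (by omega : (0:Int) ≤ p), Int.toNat_of_nonneg (by omega : (0:Int) ≤ n)] at this
        exact hd ((PySem.Int.mod_eq_zero_iff_dvd n p).mpr this)
      simp only [bExpGo, beq_iff_eq, hd, if_false, Nat.factorization_eq_zero_of_not_dvd hnd]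
      simp

-- B's square-root-bounded trial division agrees with A's full trial division
theorem bIsPrimeGo_eq (fuel : Nat) : ∀ (num i : Int), 2 ≤ i → num.toNat + 1 ≤ fuel + i.toNat →
    (bIsPrimeGo fuel num i = true ↔ ∀ j : Int, i ≤ j → j * j ≤ num → ¬ j ∣ num) := by
  induction fuel with
  | zero =>
    intro num i h2 hf
    simp only [bIsPrimeGo, true_iff]
    intro j hij hjj _
    have hni : num < i := by omega
    nlinarith
  | succ f ih =>
    intro num i h2 hf
    by_cases hii : i * i ≤ num
    · by_cases hm : PySem.Int.mod num i = 0
      · have hdvd : i ∣ num := (PySem.Int.mod_eq_zero_iff_dvd num i).mp hm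
        simp only [bIsPrimeGo, if_pos hii, hm, beq_self_eq_true, if_true, Bool.false_eq_true,
          false_iff, not_forall]
        exact ⟨i, le_refl i, hii, fun h => h hdvd⟩
      · have hnd : ¬ i ∣ num := fun h => hm ((PySem.Int.mod_eq_zero_iff_dvd num i).mpr h)
        have hmb : (PySem.Int.mod num i == 0) = false := by simpa using hm
        simp only [bIsPrimeGo, if_pos hii, hmb, Bool.false_eq_true, if_false]
        rw [ih num (i + 1) (by omega) (by omega)]
        constructor
        · intro hall j hij hjj hjd
          by_cases hji : j = i
          · exact hnd (hji ▸ hjd)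
          · exact hall j (by omega) hjj hjd
        · intro hall j hij hjj
          exact hall j (by omega) hjj
    · simp only [bIsPrimeGo, if_neg hii, true_iff]
      intro j hij hjj _
      nlinarith
theorem isPrimeB_eq (num : Int) : isPrimeB num = isPrimeA num := by
  rw [Bool.eq_iff_iff, isPrimeA_iff]
  unfold isPrimeB
  split
  · rename_i h
    simp only [Bool.false_eq_true, false_iff, not_and]
    intro _ _; omega
  · rename_i h
    have h2 : 2 ≤ num := by omega
    rw [bIsPrimeGo_eq num.toNat num 2 (le_refl 2) (by omega)]
    constructor
    · intro hall
      refine ⟨?_, h2⟩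
      rw [Nat.prime_def_le_sqrt]
      refine ⟨by omega, ?_⟩
      intro m hm2 hms hmd
      have hmm : (m : Int) * (m : Int) ≤ num := by
        have := Nat.le_sqrt.mp hms
        have hcast : ((m * m : Nat) : Int) ≤ ((num.toNat : Nat) : Int) := by exact_mod_cast this
        rw [Int.toNat_of_nonneg (by omega : (0:Int) ≤ num)] at hcast
        push_cast at hcast
        exact hcast
      have hdint : (m : Int) ∣ num := by
        have : (m : Int) ∣ (num.toNat : Int) := Int.natCast_dvd_natCast.mpr hmd
        rwa [Int.toNat_of_nonneg (by omega : (0:Int) ≤ num)] at this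
      exact hall (m : Int) (by exact_mod_cast hm2) hmm hdint
    · rintro ⟨hp, -⟩ j hj2 hjj hjd
      rw [Nat.prime_def_le_sqrt] at hp
      have hjd' : j.toNat ∣ num.toNat := by
        have : (j.toNat : Int) ∣ (num.toNat : Int) := by
          rwa [Int.toNat_of_nonneg (by omega : (0:Int) ≤ j),
            Int.toNat_of_nonneg (by omega : (0:Int) ≤ num)]
        exact_mod_cast this
      refine hp.2 j.toNat (by omega) ?_ hjd'
      rw [Nat.le_sqrt]
      have : ((j.toNat * j.toNat : Nat) : Int) ≤ ((num.toNat : Nat) : Int) := by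
        push_cast
        rw [Int.toNat_of_nonneg (by omega : (0:Int) ≤ j),
          Int.toNat_of_nonneg (by omega : (0:Int) ≤ num)]
        exact hjj
      exact_mod_cast this

-- closed form for B's per-number exponent
theorem exponent_of_closed (n prime : Int) : exponent_of n prime =
    if isPrimeA prime = true then (n.toNat.factorization prime.toNat : Int) else 0 := by
  unfold exponent_of
  rw [isPrimeB_eq]
  by_cases hp : isPrimeA prime = true
  · obtain ⟨hpr, h2⟩ := (isPrimeA_iff prime).mp hp
    by_cases hn : n ≤ 1
    · rw [if_pos (by simp [hn]), if_pos hp,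
        factorization_le_one_eq_zero n.toNat prime.toNat (by omega)]
      simp
    · rw [if_neg (by simp [hp]; omega), if_pos hp,
        bExpGo_eq n.toNat n prime 0 hpr h2 (by omega) (le_refl _)]
      simp
  · rw [if_pos (by simp [Bool.eq_false_iff.mpr hp]), if_neg hp]

-- the two per-number exponents agree
theorem aExp_eq (n prime : Int) : aExp n prime = exponent_of n prime := by
  unfold aExp
  rw [aExpGo_eq (3 * n.toNat) n 2 0 prime (le_refl 2)
    (by intro q hq2 hqlt _ _; omega) (by omega), exponent_of_closed]
  simp only [zero_add]
  by_cases hp : isPrimeA prime = true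
  · have h2 : 2 ≤ prime := ((isPrimeA_iff prime).mp hp).2
    rw [if_pos ⟨hp, h2⟩, if_pos hp]
  · rw [if_neg (fun h => hp h.1), if_neg hp]

theorem exponent_of_nonneg (n prime : Int) : 0 ≤ exponent_of n prime := by
  rw [exponent_of_closed]
  split
  · exact Int.natCast_nonneg _
  · exact le_refl 0

-- invariant-based characterization of A's for loop: after a nonempty prefix P,
-- largest is the max exponent over P and in_list the least element attaining it
theorem foldA (prime : Int) (numbers : List Int) :
    ∀ (rest P : List Int) (in_l lg : Int), numbers = P ++ rest →
    lg ∈ P.map (fun x => exponent_of x prime) →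
    (∀ y ∈ P, exponent_of y prime ≤ lg) →
    in_l ∈ P.filter (fun x => exponent_of x prime == lg) →
    (∀ y ∈ P.filter (fun x => exponent_of x prime == lg), in_l ≤ y) →
    ((rest.foldl (aStep numbers prime) (in_l, lg, (P.length : Int))).2.1 ∈
        numbers.map (fun x => exponent_of x prime) ∧
     (∀ y ∈ numbers, exponent_of y prime ≤
        (rest.foldl (aStep numbers prime) (in_l, lg, (P.length : Int))).2.1) ∧
     (rest.foldl (aStep numbers prime) (in_l, lg, (P.length : Int))).1 ∈
        numbers.filter (fun x => exponent_of x prime ==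
          (rest.foldl (aStep numbers prime) (in_l, lg, (P.length : Int))).2.1) ∧
     (∀ y ∈ numbers.filter (fun x => exponent_of x prime ==
          (rest.foldl (aStep numbers prime) (in_l, lg, (P.length : Int))).2.1),
        (rest.foldl (aStep numbers prime) (in_l, lg, (P.length : Int))).1 ≤ y)) := by
  intro rest
  induction rest with
  | nil =>
    intro P in_l lg hnum hlg hbound hin hmin
    rw [List.append_nil] at hnum
    subst hnum
    simp only [List.foldl_nil]
    refine ⟨hlg, ?_, hin, hmin⟩
    intro y hy
    exact hbound y hy
  | cons x t ih =>
    intro P in_l lg hnum hlg hbound hin hmin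
    have hget : PySem.List.pyGetD numbers ((P.length : Nat) : Int) 0 = x := by
      rw [PySem.List.pyGetD_natCast, hnum,
        List.getD_append_right P (x :: t) 0 P.length (le_refl _)]
      simp
    have hstep : aStep numbers prime (in_l, lg, (P.length : Int)) x =
        (if exponent_of x prime ≥ lg then
          (if exponent_of x prime = lg then min x in_l else x)
         else in_l,
         if exponent_of x prime ≥ lg then exponent_of x prime else lg,
         ((P ++ [x]).length : Int)) := by
      unfold aStep
      simp only [aExp_eq, hget]
      have hlen : ((P.length : Int)) + 1 = (((P ++ [x]).length : Nat) : Int) := by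
        push_cast [List.length_append, List.length_cons, List.length_nil]
        ring
      by_cases hge : exponent_of x prime ≥ lg
      · rw [if_pos hge, if_pos hge, if_pos hge, hlen]
      · rw [if_neg hge, if_neg hge, if_neg hge, hlen]
    rw [List.foldl_cons, hstep]
    by_cases hge : exponent_of x prime ≥ lg
    · by_cases heq : exponent_of x prime = lg
      · -- tie: largest stays, in_list becomes min of the two candidates
        rw [if_pos hge, if_pos heq, if_pos hge]
        apply ih (P ++ [x]) (min x in_l) (exponent_of x prime)
        · rw [hnum, List.append_assoc]; rfl
        · rw [List.map_append, List.mem_append]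
          right; simp
        · intro y hy
          rw [List.mem_append] at hy
          rcases hy with hy | hy
          · rw [heq]; exact hbound y hy
          · simp at hy; subst hy; exact le_refl _
        · rw [List.filter_append, List.mem_append]
          rcases min_choice x in_l with hmm | hmm
          · right; rw [hmm]; simp
          · left; rw [hmm, heq]; exact hin
        · intro y hy
          rw [List.filter_append, List.mem_append] at hy
          rcases hy with hy | hy
          · rw [heq] at hy
            exact le_trans (min_le_right x in_l) (hmin y hy)
          · simp at hy
            rw [hy]
            exact min_le_left _ _
      · -- strictly larger exponent: x becomes the sole candidate
        rw [if_pos hge, if_neg heq, if_pos hge]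
        have hlt : lg < exponent_of x prime := lt_of_le_of_ne hge (fun h => heq h.symm)
        apply ih (P ++ [x]) x (exponent_of x prime)
        · rw [hnum, List.append_assoc]; rfl
        · rw [List.map_append, List.mem_append]
          right; simp
        · intro y hy
          rw [List.mem_append] at hy
          rcases hy with hy | hy
          · exact le_of_lt (lt_of_le_of_lt (hbound y hy) hlt)
          · simp at hy; subst hy; exact le_refl _
        · rw [List.filter_append, List.mem_append]
          right; simp
        · intro y hy
          rw [List.filter_append, List.mem_append] at hy
          rcases hy with hy | hy
          · rw [List.mem_filter] at hy
            have := hbound y hy.1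
            have heq' := of_decide_eq_true hy.2
            omega
          · simp at hy
            rw [hy]
    · -- smaller exponent: state unchanged
      rw [if_neg hge, if_neg hge]
      apply ih (P ++ [x]) in_l lg
      · rw [hnum, List.append_assoc]; rfl
      · rw [List.map_append, List.mem_append]; left; exact hlg
      · intro y hy
        rw [List.mem_append] at hy
        rcases hy with hy | hy
        · exact hbound y hy
        · simp at hy; subst hy; omega
      · rw [List.filter_append, List.mem_append]; left; exact hin
      · intro y hy
        rw [List.filter_append, List.mem_append] at hy
        rcases hy with hy | hy
        · exact hmin y hy
        · rw [List.mem_filter] at hy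
          have hyx : y = x := by simpa using hy.1
          have heq' : exponent_of y prime = lg := by simpa using hy.2
          rw [hyx] at heq'
          omega

-- ===== VERDICT (by name: the statement is the Claim_ definition above) =====
theorem largest_exponent_spec : Claim_equal_largest_exponent := by
  intro numbers prime _ hpre
  unfold Spec_largest_exponent
  obtain ⟨x, xs, rfl⟩ : ∃ x xs, numbers = x :: xs := by
    cases numbers with
    | nil => exact absurd rfl hpre
    | cons a l => exact ⟨a, l, rfl⟩
  -- A's first iteration from the initial state (numbers[0], 0, 0)
  have hget0 : PySem.List.pyGetD (x :: xs) (0 : Int) 0 = x := by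
    rw [PySem.List.pyGetD_ofNat']
    rfl
  have hfirst : aStep (x :: xs) prime (x, 0, 0) x = (x, exponent_of x prime, 1) := by
    unfold aStep
    simp only [aExp_eq, hget0]
    rw [if_pos (exponent_of_nonneg x prime)]
    by_cases h0 : exponent_of x prime = 0
    · rw [if_pos h0, min_self, h0]
      norm_num
    · rw [if_neg h0]
      norm_num
  have hA : largest_exponent (x :: xs) prime =
      (xs.foldl (aStep (x :: xs) prime) (x, exponent_of x prime, (([x] : List Int).length : Int))).1 := by
    unfold largest_exponent
    have hg : PySem.List.pyGet? (x :: xs) 0 = some x := by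
      simp [PySem.List.pyGet?, PySem.List.pyIdx?]
    rw [hg]
    show ((x :: xs).foldl (aStep (x :: xs) prime) (x, 0, 0)).1 = _
    rw [List.foldl_cons, hfirst]
    have h1 : (([x] : List Int).length : Int) = 1 := by norm_num
    rw [h1]
  obtain ⟨hmax_mem, hmax_bd, hmin_mem, hmin_bd⟩ :=
    foldA prime (x :: xs) xs [x] x (exponent_of x prime) rfl (by simp)
      (by intro y hy; simp at hy; subst hy; exact le_refl _)
      (by simp) (by intro y hy; simp at hy; omega)
  set r := xs.foldl (aStep (x :: xs) prime) (x, exponent_of x prime, (([x] : List Int).length : Int)) with hr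
  -- B's max over the exponent table equals A's final `largest`
  obtain ⟨best, hbest⟩ : ∃ b, PySem.List.max? ((x :: xs).map (fun n => exponent_of n prime))
      (fun e => e) = some b := by
    cases h : PySem.List.max? ((x :: xs).map (fun n => exponent_of n prime)) (fun e => e) with
    | none => rw [PySem.List.max?_eq_none_iff] at h; simp at h
    | some b => exact ⟨b, rfl⟩
  have hb_mem := PySem.List.max?_mem hbest
  have hb_max := PySem.List.max?_isMax hbest
  have hbr : best = r.2.1 := by
    apply le_antisymm
    · obtain ⟨y, hy, hye⟩ := List.mem_map.mp hb_mem
      rw [← hye]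
      exact hmax_bd y hy
    · exact hb_max _ hmax_mem
  -- B's argmax list is the filter of numbers by maximal exponent
  have hlist : (((x :: xs).zip ((x :: xs).map (fun n => exponent_of n prime))).filter
        (fun p => p.2 == best)).map Prod.fst =
      (x :: xs).filter (fun a => exponent_of a prime == best) := by
    rw [← List.map_prod_left_eq_zip (l := x :: xs) (f := fun n => exponent_of n prime),
      List.filter_map, List.map_map]
    simp [Function.comp_def]
  obtain ⟨m, hm⟩ : ∃ m, PySem.List.min? ((x :: xs).filter
      (fun a => exponent_of a prime == best)) (fun n => n) = some m := by
    cases h : PySem.List.min? ((x :: xs).filter (fun a => exponent_of a prime == best))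
        (fun n => n) with
    | none =>
      rw [PySem.List.min?_eq_none_iff] at h
      rw [hbr] at h
      rw [h] at hmin_mem
      simp at hmin_mem
    | some b => exact ⟨b, rfl⟩
  have hm_mem := PySem.List.min?_mem hm
  have hm_min := PySem.List.min?_isMin hm
  have hrm : r.1 = m := by
    apply le_antisymm
    · apply hmin_bd
      rw [← hbr]
      exact hm_mem
    · apply hm_min
      rw [hbr]
      exact hmin_mem
  -- assemble
  rw [hA, hrm]
  simp only [largest_exponent_alt, hbest]
  rw [hlist, hm]
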